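-- pv_equiv track=rewrite | github.com/anilpai/leetcode | Strings/KthUniqChar.py | KthUniqChar
-- ===== SOURCE A (Python) =====
-- def KthUniqChar(s, k):
--     if k < 1:
--         return None
--
--     n = len(s)
--     count = [0] * 256
--     index = [n] * 256
--
--     for x,i in enumerate(s):
--         count[ord(i)] += 1
--
--         if count[ord(i)] == 1:
--             index[ord(i)] = x
--
--         if count[ord(i)] == 2:
--             index[ord(i)] = n
--
--     result = [i for i in sorted(index) if i < n]
--     if k > len(result):
--         return None
--     return s[result[k-1]]
-- ===== SOURCE B (Python) =====
-- def KthUniqChar(s, k):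
--     counts = {}
--     for c in s:
--         counts[c] = counts.get(c, 0) + 1
--     uniques = [c for c in s if counts[c] == 1]
--     if k < 1 or k > len(uniques):
--         return None
--     return uniques[k - 1]
-- ===== Notes on version B (the rewrite author's own statement) =====
-- stated objective: simpler
-- what changed: B replaces the 256-slot count/index arrays and the sort of the index table by a dict counter pass followed by an in-order rescan of s collecting the characters whose count is 1, returning the k-th of them directly.
import Mathlib
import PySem

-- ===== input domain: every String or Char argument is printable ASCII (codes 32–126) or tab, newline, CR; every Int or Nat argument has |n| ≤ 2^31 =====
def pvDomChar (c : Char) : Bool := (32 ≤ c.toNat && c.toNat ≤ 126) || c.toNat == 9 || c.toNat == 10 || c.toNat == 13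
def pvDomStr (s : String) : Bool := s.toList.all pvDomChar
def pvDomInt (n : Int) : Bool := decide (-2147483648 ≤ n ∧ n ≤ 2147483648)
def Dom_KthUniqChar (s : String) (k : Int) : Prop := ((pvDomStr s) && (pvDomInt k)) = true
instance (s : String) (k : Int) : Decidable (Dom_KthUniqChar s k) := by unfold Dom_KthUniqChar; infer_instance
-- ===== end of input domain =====

-- B drops A's 256-slot count/index arrays and the sort: it counts with a dict and rescans s
-- collecting the characters of count 1 in order (objective: simpler).

-- ===== PORT A =====
-- count[ord(i)] / index[ord(i)] reads and writes are ported with List.getD / List.set; this is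
-- exact on the stated domain, where every character code is < 256 and hence in range.
def KthUniqChar (s : String) (k : Int) : Option String :=
  if k < 1 then none
  else
    let cs := s.toList
    let n : Int := (cs.length : Int)
    let st := (PySem.List.enumerate cs 0).foldl
      (fun (st : List Int × List Int) (xi : Int × Char) =>
        let o := xi.2.toNat
        let count := st.1.set o (st.1.getD o 0 + 1)
        let index := if count.getD o 0 == 1 then st.2.set o xi.1 else st.2
        let index := if count.getD o 0 == 2 then index.set o n else index
        (count, index))
      (List.replicate 256 0, List.replicate 256 n)
    let result := (PySem.List.sorted st.2 (fun x => x) false).filter (fun i => decide (i < n))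
    if (result.length : Int) < k then none
    else match PySem.List.pyGet? result (k - 1) with
      | some i =>
          match PySem.List.pyGet? cs i with
          | some c => some (String.ofList [c])
          | none => none
      | none => none

-- ===== PORT B =====
def KthUniqChar_alt (s : String) (k : Int) : Option String :=
  let cs := s.toList
  let counts := cs.foldl (fun d c => d.insert c (d.getD c 0 + 1)) (PySem.Dict.empty : PySem.Dict Char Int)
  let uniques := cs.foldl (fun acc c => if counts.getD c 0 == 1 then acc ++ [c] else acc) []
  if k < 1 ∨ (uniques.length : Int) < k then none
  else
    match PySem.List.pyGet? uniques (k - 1) with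
    | some c => some (String.ofList [c])
    | none => none

-- ===== PRECONDITION & SPEC =====
def Spec_KthUniqChar (s : String) (k : Int) (out : Option String) : Prop := out = KthUniqChar_alt s k
instance (s : String) (k : Int) (out : Option String) : Decidable (Spec_KthUniqChar s k out) := by unfold Spec_KthUniqChar; infer_instance

-- ===== CLAIM (what is proved, stated in full; the proofs are below) =====
def Claim_equal_KthUniqChar : Prop := ∀ (s : String) (k : Int), Dom_KthUniqChar s k → Spec_KthUniqChar s k (KthUniqChar s k)

-- ===== LEMMAS AND PROOFS =====

-- character-code predicate and closed forms of the two programs' intermediate data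
def pvP (v : Nat) : Char → Bool := fun c => c.toNat == v
def pvCnt (cs : List Char) (v : Nat) : Nat := cs.countP (pvP v)
def pvFi (cs : List Char) (v : Nat) : Nat := cs.findIdx (pvP v)
def pvCA (cs : List Char) : List Int := (List.range 256).map (fun v => (pvCnt cs v : Int))
def pvIA (n : Int) (cs : List Char) : List Int :=
  (List.range 256).map (fun v => if pvCnt cs v = 1 then (pvFi cs v : Int) else n)
def pvUq (cs : List Char) : Char → Bool := fun c => cs.count c == 1
def pvU (cs : List Char) : List Nat :=
  (List.range cs.length).filter (fun i => pvUq cs (cs.getD i default))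
def pvV (cs : List Char) : List Int :=
  ((List.range 256).filter (fun v => decide (pvCnt cs v = 1))).map (fun v => (pvFi cs v : Int))

theorem pv_set_map_range {α : Type} (m o : Nat) (x : α) (f : Nat → α) :
    ((List.range m).map f).set o x = (List.range m).map (fun v => if v = o then x else f v) := by
  apply List.ext_getElem
  · simp
  · intro i h1 h2
    simp only [List.getElem_set, List.getElem_map, List.getElem_range] at *
    by_cases hio : o = i <;> simp [hio]
    · intro hh; exact absurd hh.symm hio

theorem pv_cnt_append (cs : List Char) (c : Char) (v : Nat) :
    pvCnt (cs ++ [c]) v = pvCnt cs v + (if c.toNat = v then 1 else 0) := by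
  simp [pvCnt, List.countP_append, List.countP_cons, pvP]

theorem pv_toNat_inj {a b : Char} (h : a.toNat = b.toNat) : a = b := by
  apply Char.ext; exact UInt32.toNat_inj.mp h

theorem pv_count_eq (cs : List Char) (c : Char) : pvCnt cs c.toNat = cs.count c := by
  unfold pvCnt List.count
  apply List.countP_congr
  intro c' _
  simp only [pvP, beq_iff_eq]
  constructor
  · intro h; exact pv_toNat_inj h
  · intro h; rw [h]

theorem pv_fi_spec (cs : List Char) (v : Nat) (h1 : pvCnt cs v = 1) :
    pvFi cs v < cs.length ∧ (cs.getD (pvFi cs v) default).toNat = v := by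
  have hex : ∃ x ∈ cs, pvP v x = true := by
    by_contra hc
    push Not at hc
    have : pvCnt cs v = 0 := List.countP_eq_zero.mpr (by intro a ha; exact by simpa using hc a ha)
    omega
  have hlt := List.findIdx_lt_length_of_exists hex
  refine ⟨hlt, ?_⟩
  have h2 := @List.findIdx_getElem _ (pvP v) cs hlt
  simp only [pvP, beq_iff_eq] at h2
  unfold pvFi
  rw [List.getD_eq_getElem _ _ hlt]
  exact h2

theorem pv_fi_lt (cs : List Char) (v : Nat) (h1 : pvCnt cs v = 1) : pvFi cs v < cs.length := by
  apply List.findIdx_lt_length_of_exists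
  by_contra hc
  push Not at hc
  have : pvCnt cs v = 0 := List.countP_eq_zero.mpr (by intro a ha; exact by simpa using hc a ha)
  omega

theorem pv_fi_append_of_cnt_one (l : List Char) (c : Char) (v : Nat) (h1 : pvCnt l v = 1) :
    pvFi (l ++ [c]) v = pvFi l v := by
  unfold pvFi
  rw [List.findIdx_append]
  rw [if_pos (show List.findIdx (pvP v) l < l.length from pv_fi_lt l v h1)]

theorem pv_fi_append_self (l : List Char) (c : Char) (h0 : pvCnt l c.toNat = 0) :
    pvFi (l ++ [c]) c.toNat = l.length := by
  unfold pvFi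
  rw [List.findIdx_append]
  have hlen : List.findIdx (pvP c.toNat) l = l.length := by
    rw [List.findIdx_eq_length]
    intro x hx
    have := List.countP_eq_zero.mp h0 x hx
    simpa using this
  rw [hlen]
  simp [List.findIdx_cons, pvP]

theorem pv_IA_append_ne (n : Int) (l : List Char) (c : Char) (v : Nat) (hv : v ≠ c.toNat) :
    (if pvCnt (l ++ [c]) v = 1 then (pvFi (l ++ [c]) v : Int) else n)
      = (if pvCnt l v = 1 then (pvFi l v : Int) else n) := by
  have hc : pvCnt (l ++ [c]) v = pvCnt l v := by
    rw [pv_cnt_append, if_neg (fun e => hv e.symm)]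
    omega
  rw [hc]
  by_cases h1 : pvCnt l v = 1
  · rw [if_pos h1, if_pos h1, pv_fi_append_of_cnt_one l c v h1]
  · rw [if_neg h1, if_neg h1]

theorem pv_fold (n : Int) (cs : List Char) (h : ∀ c ∈ cs, c.toNat < 256) :
    (PySem.List.enumerate cs 0).foldl
      (fun (st : List Int × List Int) (xi : Int × Char) =>
        let o := xi.2.toNat
        let count := st.1.set o (st.1.getD o 0 + 1)
        let index := if count.getD o 0 == 1 then st.2.set o xi.1 else st.2
        let index := if count.getD o 0 == 2 then index.set o n else index
        (count, index))
      (List.replicate 256 0, List.replicate 256 n) = (pvCA cs, pvIA n cs) := by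
  induction cs using List.reverseRecOn with
  | nil =>
      rw [show PySem.List.enumerate ([] : List Char) 0 = [] from rfl, List.foldl_nil]
      refine Prod.ext ?_ ?_
      · show List.replicate 256 (0 : Int) = pvCA []
        unfold pvCA pvCnt
        simp only [List.countP_nil, Nat.cast_zero, List.map_const', List.length_range]
      · show List.replicate 256 n = pvIA n []
        unfold pvIA pvCnt
        simp only [List.countP_nil]
        simp [List.map_const']
  | append_singleton l c ih =>
      have hl : ∀ c' ∈ l, c'.toNat < 256 := fun c' hc' => h c' (List.mem_append_left _ hc')
      have ho : c.toNat < 256 := h c (List.mem_append_right _ (List.mem_singleton_self c))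
      rw [PySem.List.enumerate_append, List.foldl_append, ih hl]
      show (let o := c.toNat
            let count := (pvCA l).set o ((pvCA l).getD o 0 + 1)
            let index := if count.getD o 0 == 1 then (pvIA n l).set o (0 + (l.length : Int)) else (pvIA n l)
            let index := if count.getD o 0 == 2 then index.set o n else index
            (count, index)) = (pvCA (l ++ [c]), pvIA n (l ++ [c]))
      simp only [zero_add]
      rw [show ((pvCA l).getD c.toNat 0) = (pvCnt l c.toNat : Int) from
        PySem.List.getD_map_range _ _ _ _ ho]
      rw [show ((pvCA l).set c.toNat ((pvCnt l c.toNat : Int) + 1))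
            = (List.range 256).map (fun v => if v = c.toNat then (pvCnt l c.toNat : Int) + 1 else (pvCnt l v : Int)) from
        pv_set_map_range 256 c.toNat _ _]
      rw [show (((List.range 256).map (fun v => if v = c.toNat then (pvCnt l c.toNat : Int) + 1 else (pvCnt l v : Int))).getD c.toNat 0)
            = (pvCnt l c.toNat : Int) + 1 from by
        rw [PySem.List.getD_map_range _ _ _ _ ho]; simp]
      have hCA : (List.range 256).map (fun v => if v = c.toNat then (pvCnt l c.toNat : Int) + 1 else (pvCnt l v : Int))
          = pvCA (l ++ [c]) := by
        unfold pvCA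
        apply List.map_congr_left
        intro v _
        rw [pv_cnt_append]
        by_cases hv : v = c.toNat
        · rw [if_pos hv, hv, if_pos rfl]; push_cast; ring
        · rw [if_neg hv, if_neg (fun e => hv e.symm)]; simp
      rw [hCA]
      refine Prod.ext rfl ?_
      show (if ((pvCnt l c.toNat : Int) + 1 == 2)
              then (if ((pvCnt l c.toNat : Int) + 1 == 1)
                    then (pvIA n l).set c.toNat (l.length : Int) else (pvIA n l)).set c.toNat n
              else (if ((pvCnt l c.toNat : Int) + 1 == 1)
                    then (pvIA n l).set c.toNat (l.length : Int) else (pvIA n l)))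
            = pvIA n (l ++ [c])
      by_cases h0 : pvCnt l c.toNat = 0
      · have hb1 : ((pvCnt l c.toNat : Int) + 1 == 1) = true := by rw [h0]; decide
        have hb2 : ((pvCnt l c.toNat : Int) + 1 == 2) = false := by rw [h0]; decide
        rw [hb1, hb2]
        simp only [Bool.false_eq_true, if_false, if_true]
        unfold pvIA
        rw [pv_set_map_range]
        apply List.map_congr_left
        intro v _
        by_cases hv : v = c.toNat
        · have hc1 : pvCnt (l ++ [c]) c.toNat = 1 := by rw [pv_cnt_append, if_pos rfl, h0]
          rw [if_pos hv, hv, if_pos hc1, pv_fi_append_self l c h0]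
        · rw [if_neg hv, pv_IA_append_ne n l c v hv]
      · by_cases h1 : pvCnt l c.toNat = 1
        · have hb1 : ((pvCnt l c.toNat : Int) + 1 == 1) = false := by rw [h1]; decide
          have hb2 : ((pvCnt l c.toNat : Int) + 1 == 2) = true := by rw [h1]; decide
          rw [hb1, hb2]
          simp only [Bool.false_eq_true, if_false, if_true]
          unfold pvIA
          rw [pv_set_map_range]
          apply List.map_congr_left
          intro v _
          by_cases hv : v = c.toNat
          · have hc2 : pvCnt (l ++ [c]) c.toNat = 2 := by rw [pv_cnt_append, if_pos rfl, h1]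
            rw [if_pos hv, hv, if_neg (by omega)]
          · rw [if_neg hv, pv_IA_append_ne n l c v hv]
        · have hb1 : ((pvCnt l c.toNat : Int) + 1 == 1) = false := by
            simp only [beq_eq_false_iff_ne, ne_eq]
            intro hx
            have : pvCnt l c.toNat = 0 := by exact_mod_cast (by omega : (pvCnt l c.toNat : Int) = 0)
            exact h0 this
          have hb2 : ((pvCnt l c.toNat : Int) + 1 == 2) = false := by
            simp only [beq_eq_false_iff_ne, ne_eq]
            intro hx
            have : pvCnt l c.toNat = 1 := by exact_mod_cast (by omega : (pvCnt l c.toNat : Int) = 1)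
            exact h1 this
          rw [hb1, hb2]
          simp only [Bool.false_eq_true, if_false]
          unfold pvIA
          apply List.map_congr_left
          intro v _
          by_cases hv : v = c.toNat
          · have hc2 : pvCnt (l ++ [c]) c.toNat = pvCnt l c.toNat + 1 := by
              rw [pv_cnt_append, if_pos rfl]
            rw [hv, if_neg (by omega), if_neg (by omega)]
          · rw [pv_IA_append_ne n l c v hv]

theorem pv_count_one_idx (cs : List Char) (i : Nat) (hi : i < cs.length)
    (h : cs.count (cs.getD i default) = 1) :
    ∀ j, j < cs.length → cs.getD j default = cs.getD i default → j = i := by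
  intro j hj hji
  rw [List.getD_eq_getElem _ _ hj, List.getD_eq_getElem _ _ hi] at hji
  by_contra hne
  have hdup : List.Duplicate (cs.getD i default) cs := by
    rw [List.duplicate_iff_exists_distinct_get]
    rw [List.getD_eq_getElem _ _ hi]
    rcases Nat.lt_or_ge j i with hlt | hge
    · exact ⟨⟨j, hj⟩, ⟨i, hi⟩, by simpa using hlt, by simp [hji], by simp⟩
    · have hlt : i < j := lt_of_le_of_ne hge (fun e => hne e.symm)
      exact ⟨⟨i, hi⟩, ⟨j, hj⟩, by simpa using hlt, by simp, by simp [hji]⟩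
  have := List.duplicate_iff_two_le_count.mp hdup
  omega

theorem pvU_pairwise (cs : List Char) : (pvU cs).Pairwise (· < ·) := by
  exact List.Pairwise.filter _ (List.pairwise_lt_range)

theorem pv_map_getD (l : List Char) (q : Char → Bool) :
    ((List.range l.length).filter (fun i => q (l.getD i default))).map (fun i => l.getD i default)
      = l.filter q := by
  induction l with
  | nil => simp
  | cons c t ih =>
    have hr : List.range (c :: t).length = 0 :: (List.range t.length).map Nat.succ := by
      simp [List.range_succ_eq_map]
    rw [hr, List.filter_cons]
    have hpred : ((fun i => q ((c :: t).getD i default)) ∘ Nat.succ) = fun i => q (t.getD i default) := rfl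
    have hmapf : ((fun i => (c :: t).getD i default) ∘ Nat.succ) = fun i => t.getD i default := rfl
    by_cases hq : q c
    · simp only [List.getD_cons_zero, hq, if_pos, List.map_cons, List.filter_map,
        List.map_map, hpred, hmapf, ih, List.filter_cons]
    · simp only [List.getD_cons_zero, hq, if_neg, Bool.false_eq_true, not_false_iff,
        List.filter_map, List.map_map, hpred, hmapf, ih, List.filter_cons]

theorem pv_filter_IA (cs : List Char) :
    (pvIA (cs.length : Int) cs).filter (fun i => decide (i < (cs.length : Int))) = pvV cs := by
  unfold pvIA pvV
  rw [List.filter_map]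
  have hp : List.filter ((fun i => decide (i < (cs.length : Int))) ∘
        (fun v => if pvCnt cs v = 1 then (pvFi cs v : Int) else (cs.length : Int))) (List.range 256)
      = List.filter (fun v => decide (pvCnt cs v = 1)) (List.range 256) := by
    apply List.filter_congr
    intro v _
    simp only [Function.comp]
    by_cases h1 : pvCnt cs v = 1
    · have := (pv_fi_spec cs v h1).1
      simp [h1]
      omega
    · simp [h1]
  rw [hp]
  apply List.map_congr_left
  intro v hv
  rw [List.mem_filter] at hv
  simp [decide_eq_true_eq] at hv
  simp [hv.2]

theorem pv_perm (cs : List Char) (h : ∀ c ∈ cs, c.toNat < 256) :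
    (pvV cs).Perm ((pvU cs).map (fun (i : Nat) => (i : Int))) := by
  rw [List.perm_ext_iff_of_nodup]
  · intro x
    unfold pvV pvU
    simp only [List.mem_map, List.mem_filter, List.mem_range, decide_eq_true_eq]
    constructor
    · rintro ⟨v, ⟨hv256, hcnt⟩, rfl⟩
      obtain ⟨hlt, hto⟩ := pv_fi_spec cs v hcnt
      refine ⟨pvFi cs v, ⟨hlt, ?_⟩, rfl⟩
      unfold pvUq
      simp only [beq_iff_eq]
      rw [← pv_count_eq, hto]
      exact hcnt
    · rintro ⟨i, ⟨hi, huq⟩, rfl⟩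
      unfold pvUq at huq
      simp only [beq_iff_eq] at huq
      set c := cs.getD i default with hc
      refine ⟨c.toNat, ⟨h c (by rw [hc, List.getD_eq_getElem _ _ hi]; exact List.getElem_mem hi), ?_⟩, ?_⟩
      · rw [pv_count_eq]; exact huq
      · have h1 : pvCnt cs c.toNat = 1 := by rw [pv_count_eq]; exact huq
        obtain ⟨hlt, hto⟩ := pv_fi_spec cs c.toNat h1
        have := pv_count_one_idx cs i hi huq (pvFi cs c.toNat) hlt (pv_toNat_inj hto)
        rw [this]
  · unfold pvV
    apply List.Nodup.map_on
    · intro v1 hv1 v2 hv2 heq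
      simp only [List.mem_filter, List.mem_range, decide_eq_true_eq] at hv1 hv2
      have e : pvFi cs v1 = pvFi cs v2 := by exact_mod_cast heq
      obtain ⟨_, h1⟩ := pv_fi_spec cs v1 hv1.2
      obtain ⟨_, h2⟩ := pv_fi_spec cs v2 hv2.2
      rw [← h1, ← h2, e]
    · exact List.Nodup.filter _ (List.nodup_range)
  · apply List.Nodup.map_on
    · intro a _ b _ hab; exact_mod_cast hab
    · exact List.Nodup.filter _ (List.nodup_range)

theorem pv_sorted_filter (cs : List Char) (h : ∀ c ∈ cs, c.toNat < 256) :
    (PySem.List.sorted (pvIA (cs.length : Int) cs) (fun x => x) false).filter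
        (fun i => decide (i < (cs.length : Int)))
      = (pvU cs).map (fun (i : Nat) => (i : Int)) := by
  apply List.Perm.eq_of_pairwise (le := fun a b : Int => a ≤ b)
  · intro a b _ _ h1 h2; omega
  · exact List.Pairwise.sublist (List.filter_sublist) (PySem.List.sorted_pairwise _ _)
  · rw [List.pairwise_map]
    apply List.Pairwise.imp ?_ (pvU_pairwise cs)
    intro a b hab
    exact Int.ofNat_le.mpr (Nat.le_of_lt hab)
  · have hA : ((PySem.List.sorted (pvIA (cs.length : Int) cs) (fun x => x) false).filter
          (fun i => decide (i < (cs.length : Int)))).Perm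
        ((pvIA (cs.length : Int) cs).filter (fun i => decide (i < (cs.length : Int)))) :=
      List.Perm.filter _ (PySem.List.sorted_perm _ _ _)
    rw [pv_filter_IA] at hA
    exact hA.trans (pv_perm cs h)

theorem pv_alt_uniques (cs : List Char) :
    cs.foldl (fun acc c =>
        if (cs.foldl (fun d c => d.insert c (d.getD c 0 + 1)) (PySem.Dict.empty : PySem.Dict Char Int)).getD c 0 == 1
        then acc ++ [c] else acc) []
      = cs.filter (pvUq cs) := by
  simp only [PySem.Dict.foldl_insert_getD_add_one_eq_counter, PySem.Dict.getD_counter]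
  rw [PySem.List.foldl_append_if (fun c => ((List.count c cs : Int) == 1)) (fun c => c)]
  rw [List.map_id', List.nil_append]
  apply List.filter_congr
  intro c _
  unfold pvUq
  simp [Nat.cast_eq_one]



-- ===== VERDICT (by name: the statement is the Claim_ definition above) =====
theorem KthUniqChar_spec : Claim_equal_KthUniqChar := by
  intro s k hdom
  have h256 : ∀ c ∈ s.toList, c.toNat < 256 := by
    intro c hc
    unfold Dom_KthUniqChar pvDomStr at hdom
    simp only [Bool.and_eq_true, List.all_eq_true] at hdom
    have := hdom.1 c hc
    unfold pvDomChar at this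
    simp at this
    omega
  unfold Spec_KthUniqChar
  by_cases hk : k < 1
  · simp [KthUniqChar, KthUniqChar_alt, hk]
  · simp only [KthUniqChar, KthUniqChar_alt, if_neg hk]
    rw [pv_fold _ _ h256]
    rw [show ((pvCA s.toList, pvIA (s.toList.length : Int) s.toList).2) = pvIA (s.toList.length : Int) s.toList from rfl]
    rw [pv_sorted_filter _ h256, pv_alt_uniques]
    have hfilter : List.filter (pvUq s.toList) s.toList
        = (pvU s.toList).map (fun i => s.toList.getD i default) := by
      rw [← pv_map_getD s.toList (pvUq s.toList)]; rfl
    rw [hfilter, List.length_map, List.length_map]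
    by_cases hlt : ((pvU s.toList).length : Int) < k
    · rw [if_pos hlt, if_pos (Or.inr hlt)]
    · rw [if_neg hlt, if_neg (by push Not; exact ⟨le_of_not_gt hk, le_of_not_gt hlt⟩)]
      have hm : k - 1 = (((k - 1).toNat : Nat) : Int) := (Int.toNat_of_nonneg (by omega)).symm
      have hmlt : (k - 1).toNat < (pvU s.toList).length := by omega
      rw [hm, PySem.List.pyGet?_natCast, PySem.List.pyGet?_natCast]
      rw [List.getElem?_eq_getElem (by simpa using hmlt), List.getElem?_eq_getElem (by simpa using hmlt)]
      simp only [List.getElem_map]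
      have hidx : (pvU s.toList)[(k - 1).toNat] < s.toList.length := by
        have hmem : (pvU s.toList)[(k - 1).toNat] ∈ pvU s.toList := List.getElem_mem hmlt
        unfold pvU at hmem
        rw [List.mem_filter, List.mem_range] at hmem
        exact hmem.1
      rw [show PySem.List.pyGet? s.toList ((((pvU s.toList)[(k - 1).toNat] : Nat) : Int))
            = s.toList[((pvU s.toList)[(k - 1).toNat])]? from PySem.List.pyGet?_natCast _ _]
      rw [List.getElem?_eq_getElem hidx]
      simp only [List.getD_eq_getElem _ _ hidx]
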